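-- pv_equiv track=rewrite | github.com/smart-social-contracts/realms | src/realm_backend/core/h3.py | _h3_rotate_pent60cw
-- ===== SOURCE A (Python) =====
-- _MAX_H3_RES = 15
--
-- _CENTER_DIGIT = 0
--
-- _K_AXES_DIGIT = 1
--
-- def _rotate60cw_digit(d):
--     return [0, 3, 6, 2, 5, 1, 4, 7][d] if 0 <= d <= 7 else d
--
-- def _h3_get_digit(h, r):
--     return (h >> ((_MAX_H3_RES - r) * 3)) & 7
--
-- def _h3_set_digit(h, r, d):
--     shift = (_MAX_H3_RES - r) * 3
--     h &= ~(7 << shift)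
--     h |= (d & 7) << shift
--     return h
--
-- def _h3_rotate60cw(h, res):
--     for r in range(1, res + 1):
--         old = _h3_get_digit(h, r)
--         h = _h3_set_digit(h, r, _rotate60cw_digit(old))
--     return h
--
-- def _h3_leading_nonzero_digit(h, res):
--     for r in range(1, res + 1):
--         d = _h3_get_digit(h, r)
--         if d != _CENTER_DIGIT:
--             return d
--     return _CENTER_DIGIT
--
-- def _h3_rotate_pent60cw(h, res):
--     """Rotate an H3Index 60 degrees CW about a pentagonal center.
--     Handles the deleted k-axes subsequence inline during rotation."""
--     found_first = False
--     for r in range(1, res + 1):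
--         old = _h3_get_digit(h, r)
--         h = _h3_set_digit(h, r, _rotate60cw_digit(old))
--         if not found_first and _h3_get_digit(h, r) != _CENTER_DIGIT:
--             found_first = True
--             if _h3_leading_nonzero_digit(h, res) == _K_AXES_DIGIT:
--                 h = _h3_rotate60cw(h, res)
--     return h
-- ===== SOURCE B (Python) =====
-- _MAX_H3_RES = 15
--
-- _K_AXES_DIGIT = 1
--
-- _ROT60CW = [0, 3, 6, 2, 5, 1, 4, 7]
--
-- def _h3_rotate_pent60cw(h, res):
--     """Rotate an H3Index 60 degrees CW about a pentagonal center.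
--     Digit-vector form: extract the digits once as a list, rotate the list
--     (twice if the leading non-zero digit lands on the k-axis), and add the
--     per-digit deltas back into the index in one arithmetic pass."""
--     digits = [(h >> ((_MAX_H3_RES - r) * 3)) & 7 for r in range(1, res + 1)]
--     rot = [_ROT60CW[d] for d in digits]
--     lead = next((d for d in rot if d != 0), 0)
--     if lead == _K_AXES_DIGIT:
--         rot = [_ROT60CW[d] for d in rot]
--     delta = 0
--     for r, (od, nd) in enumerate(zip(digits, rot), start=1):
--         delta += (nd - od) << ((_MAX_H3_RES - r) * 3)
--     return h + delta
-- ===== Notes on version B (the rewrite author's own statement) =====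
-- stated objective: alternative
-- what changed: Replaces A's single interleaved bit-masking loop (rotate each digit in place, detect the leading non-zero digit mid-loop and issue an extra full rotation from inside the loop body) by a digit-vector algorithm: extract all digits into a list once, rotate the list through the permutation table (twice iff its leading non-zero entry is the k-axis digit), and write the result back as one arithmetic sum of per-digit deltas.
import Mathlib
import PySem

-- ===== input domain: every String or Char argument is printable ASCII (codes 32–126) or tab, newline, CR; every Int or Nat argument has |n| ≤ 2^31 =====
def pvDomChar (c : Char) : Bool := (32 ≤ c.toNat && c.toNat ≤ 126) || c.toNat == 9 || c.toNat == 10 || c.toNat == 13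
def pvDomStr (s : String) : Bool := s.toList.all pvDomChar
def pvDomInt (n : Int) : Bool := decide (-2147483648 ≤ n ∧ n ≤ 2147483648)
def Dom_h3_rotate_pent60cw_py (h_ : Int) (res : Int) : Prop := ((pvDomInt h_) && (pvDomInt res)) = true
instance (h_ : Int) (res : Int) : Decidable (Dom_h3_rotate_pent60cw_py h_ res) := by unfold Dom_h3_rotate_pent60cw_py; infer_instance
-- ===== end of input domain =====

set_option maxHeartbeats 1000000

-- B replaces A's single interleaved bit-masking loop (rotation plus mid-loop k-axis detection and
-- an extra rotation issued from inside the loop body) by a digit-vector algorithm: extract the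
-- digits into a list once, rotate the list (twice iff its leading non-zero entry is the k-axis
-- digit), and add the per-digit deltas back in one arithmetic pass (objective: alternative).

-- ===== PORT A =====
-- _rotate60cw_digit: the guard 0 <= d <= 7 makes the list index in range, so pyGet? is `some`
-- and getD's default is never used (exact).
def pyRotDigit (d : Int) : Int :=
  if 0 ≤ d ∧ d ≤ 7 then (PySem.List.pyGet? ([0, 3, 6, 2, 5, 1, 4, 7] : List Int) d).getD d else d

-- _h3_get_digit: the shift count (15 - r) * 3 is nonnegative for every r the loops visit when
-- res ≤ 15 (Pre_ excludes res ≥ 16, where Python raises ValueError), so .toNat is exact there.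
def pyGetDigit (h : Int) (r : Int) : Int :=
  PySem.Int.band (h >>> ((15 - r) * 3).toNat) 7

-- _h3_set_digit
def pySetDigit (h : Int) (r : Int) (d : Int) : Int :=
  PySem.Int.bor (PySem.Int.band h (Int.not ((7 : Int) <<< ((15 - r) * 3).toNat)))
    ((PySem.Int.band d 7) <<< ((15 - r) * 3).toNat)

-- _h3_rotate60cw's loop body
def stepR (h : Int) (r : Int) : Int := pySetDigit h r (pyRotDigit (pyGetDigit h r))

-- _h3_rotate60cw
def pyRotate60cw (h : Int) (res : Int) : Int :=
  (PySem.List.pyRange 1 (res + 1)).foldl stepR h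

-- _h3_leading_nonzero_digit (the early `return d` becomes structural recursion on the range list)
def pyLeadNZGo (h : Int) : List Int → Int
  | [] => 0
  | r :: rs => if pyGetDigit h r ≠ 0 then pyGetDigit h r else pyLeadNZGo h rs

def pyLeadingNonzeroDigit (h : Int) (res : Int) : Int :=
  pyLeadNZGo h (PySem.List.pyRange 1 (res + 1))

-- A's loop body (state: found_first, h)
def stepA (res : Int) (st : Bool × Int) (r : Int) : Bool × Int :=
  if st.1 = false ∧ pyGetDigit (stepR st.2 r) r ≠ 0 then
    (true, if pyLeadingNonzeroDigit (stepR st.2 r) res = 1 then pyRotate60cw (stepR st.2 r) res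
           else stepR st.2 r)
  else (st.1, stepR st.2 r)

def h3_rotate_pent60cw_py (h_ : Int) (res : Int) : Int :=
  ((PySem.List.pyRange 1 (res + 1)).foldl (stepA res) (false, h_)).2

-- ===== PORT B =====
-- _ROT60CW[d]: every value fed to the table is a 3-bit field (`& 7` / a table value), so the
-- index is in range, Python never raises, and getD's default is never used (exact).
def altRotD (d : Int) : Int :=
  (PySem.List.pyGet? ([0, 3, 6, 2, 5, 1, 4, 7] : List Int) d).getD 0

-- the digits list comprehension (shift count nonnegative on Pre_, see Pre_ comment)
def altDigits (h : Int) (res : Int) : List Int :=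
  (PySem.List.pyRange 1 (res + 1)).map
    (fun r : Int => PySem.Int.band (h >>> ((15 - r) * 3).toNat) 7)

-- the delta accumulation: delta += (nd - od) << ((15 - r) * 3)
def altStep (acc : Int) (p : Int × Int × Int) : Int :=
  acc + (p.2.2 - p.2.1) <<< ((15 - p.1) * 3).toNat

-- next((d for d in rot if d != 0), 0)
def altLead : List Int → Int
  | [] => 0
  | d :: ds => if d ≠ 0 then d else altLead ds

-- enumerate(zip(digits, rot), start=1) pairs each r of range(1, res+1) with (digits[r-1], rot[r-1]);
-- both lists have the range's length, so List.zip with the range is exact.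
def h3_rotate_pent60cw_py_alt (h_ : Int) (res : Int) : Int :=
  let digits := altDigits h_ res
  let rot0 := digits.map altRotD
  let rot := if altLead rot0 = 1 then rot0.map altRotD else rot0
  let delta := ((PySem.List.pyRange 1 (res + 1)).zip (digits.zip rot)).foldl altStep 0
  h_ + delta

-- ===== PRECONDITION & SPEC =====
-- For res ≥ 16 the loops reach r = 16 and Python's `h >> ((15 - r) * 3)` raises
-- ValueError: negative shift count — in A and in B alike; exactly those inputs are excluded.
def Pre_h3_rotate_pent60cw_py (h_ : Int) (res : Int) : Prop := res ≤ 15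
instance (h_ : Int) (res : Int) : Decidable (Pre_h3_rotate_pent60cw_py h_ res) := by
  unfold Pre_h3_rotate_pent60cw_py; infer_instance

def pvWitness_h3_rotate_pent60cw_py : Int × Int := (599193, 15)

def Spec_h3_rotate_pent60cw_py (h_ : Int) (res : Int) (out : Int) : Prop :=
  out = h3_rotate_pent60cw_py_alt h_ res
instance (h_ : Int) (res : Int) (out : Int) : Decidable (Spec_h3_rotate_pent60cw_py h_ res out) := by
  unfold Spec_h3_rotate_pent60cw_py; infer_instance

-- ===== CLAIM (what is proved, stated in full; the proofs are below) =====
def Claim_equal_h3_rotate_pent60cw_py : Prop :=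
  ∀ (h_ : Int) (res : Int), Dom_h3_rotate_pent60cw_py h_ res →
    Pre_h3_rotate_pent60cw_py h_ res →
    Spec_h3_rotate_pent60cw_py h_ res (h3_rotate_pent60cw_py h_ res)

-- ===== LEMMAS AND PROOFS =====

/-- Bit offset of H3 digit `r` (meaningful for 1 ≤ r ≤ 15). -/
def S (r : Int) : Nat := ((15 - r) * 3).toNat

def rot2 (x : Int) : Int := pyRotDigit (pyRotDigit x)

def foldA (h_ res t : Int) : Bool × Int :=
  (PySem.List.pyRange 1 (t + 1)).foldl (stepA res) (false, h_)

lemma pow2_pos (s : Nat) : (0:Int) < 2 ^ s := by positivity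
lemma pow2_add3 (s : Nat) : (2:Int) ^ (s + 3) = 2 ^ s * 8 := by rw [pow_add]; norm_num

-- ---- Nat bitwise toolkit ----

lemma natDisj {x y : Nat} (h : ∀ i, x.testBit i = true → y.testBit i = false) : x &&& y = 0 :=
  Nat.eq_of_testBit_eq fun i => by
    rw [Nat.testBit_and, Nat.zero_testBit]
    cases hx : x.testBit i
    · simp
    · simp [h i hx]

lemma orAdd : ∀ (a b : Nat), a &&& b = 0 → a ||| b = a + b := by
  intro a
  induction a using Nat.binaryRec with
  | zero => intro b _; simp
  | bit ab a ih =>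
    intro b hb
    obtain ⟨bb, b', rfl⟩ : ∃ bb b', b = Nat.bit bb b' :=
      ⟨b.testBit 0, b >>> 1, (Nat.bit_testBit_zero_shiftRight_one b).symm⟩
    rw [Nat.land_bit] at hb
    have h2 := Nat.bit_eq_zero_iff.mp hb
    rw [Nat.lor_bit, ih b' h2.1, Nat.bit_val, Nat.bit_val, Nat.bit_val]
    have hab : (ab || bb).toNat = ab.toNat + bb.toNat := by
      have := h2.2
      cases ab <;> cases bb <;> simp_all
    omega

lemma test7 (j : Nat) : (7:Nat).testBit j = decide (j < 3) := by
  rw [show (7:Nat) = 2 ^ 3 - 1 from rfl, Nat.testBit_two_pow_sub_one]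

lemma testBitLt8 (f j : Nat) (hf : f < 8) (hj : 3 ≤ j) : f.testBit j = false :=
  Nat.testBit_lt_two_pow (lt_of_lt_of_le hf (by
    calc (8:Nat) = 2 ^ 3 := rfl
      _ ≤ 2 ^ j := Nat.pow_le_pow_right (by norm_num) hj))

lemma testBitLtPow (l s j : Nat) (hl : l < 2 ^ s) (hj : s ≤ j) : l.testBit j = false :=
  Nat.testBit_lt_two_pow (lt_of_lt_of_le hl (Nat.pow_le_pow_right (by norm_num) hj))

lemma natK1 (n s : Nat) : n &&& (7 <<< s) = ((n >>> s) % 8) <<< s := by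
  apply Nat.eq_of_testBit_eq
  intro i
  rw [Nat.testBit_and, Nat.testBit_shiftLeft, Nat.testBit_shiftLeft, test7,
    show (8:Nat) = 2 ^ 3 from rfl, Nat.testBit_mod_two_pow, Nat.testBit_shiftRight]
  by_cases hsi : s ≤ i
  · have hix : s + (i - s) = i := by omega
    simp only [hsi, decide_true, Bool.true_and, ge_iff_le, hix]
    cases hn : n.testBit i <;> simp
  · simp [hsi]

lemma natOrGen (q lo b s : Nat) (hlo : lo < 2 ^ s) (hb : b < 8) :
    (q * 2 ^ (s + 3) + lo) ||| (b <<< s) = q * 2 ^ (s + 3) + b * 2 ^ s + lo := by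
  have hq3 : q <<< (s + 3) = q * 2 ^ (s + 3) := Nat.shiftLeft_eq q (s + 3)
  have hbs : b <<< s = b * 2 ^ s := Nat.shiftLeft_eq b s
  have hd1 : (q <<< (s + 3)) &&& lo = 0 := natDisj fun i hi => by
    rw [Nat.testBit_shiftLeft] at hi
    refine testBitLtPow lo s i hlo ?_
    by_cases h : s + 3 ≤ i
    · omega
    · simp [h] at hi
  have hd2 : (q <<< (s + 3)) &&& (b <<< s) = 0 := natDisj fun i hi => by
    rw [Nat.testBit_shiftLeft] at hi
    rw [Nat.testBit_shiftLeft]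
    by_cases h : s + 3 ≤ i
    · by_cases h2 : s ≤ i
      · simp only [h2, decide_true, Bool.true_and, ge_iff_le]
        exact testBitLt8 b (i - s) hb (by omega)
      · simp [h2]
    · simp [h] at hi
  have hd4 : ((q <<< (s + 3)) ||| (b <<< s)) &&& lo = 0 := natDisj fun i hi => by
    rw [Nat.testBit_or, Nat.testBit_shiftLeft, Nat.testBit_shiftLeft] at hi
    refine testBitLtPow lo s i hlo ?_
    by_cases h1 : s ≤ i
    · exact h1
    · exfalso
      simp [h1, show ¬ s + 3 ≤ i by omega] at hi
  calc (q * 2 ^ (s + 3) + lo) ||| (b <<< s)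
      = ((q <<< (s + 3)) ||| lo) ||| (b <<< s) := by rw [orAdd _ _ hd1, hq3]
    _ = ((q <<< (s + 3)) ||| (b <<< s)) ||| lo := by
        rw [Nat.or_assoc, Nat.or_comm lo, ← Nat.or_assoc]
    _ = ((q <<< (s + 3)) ||| (b <<< s)) + lo := orAdd _ _ hd4
    _ = ((q <<< (s + 3)) + (b <<< s)) + lo := by rw [orAdd _ _ hd2]
    _ = q * 2 ^ (s + 3) + b * 2 ^ s + lo := by rw [hq3, hbs]

lemma natDecomp (n s : Nat) :
    n = n / 2 ^ (s + 3) * 2 ^ (s + 3) + n / 2 ^ s % 8 * 2 ^ s + n % 2 ^ s := by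
  have h3 : n / 2 ^ s / 8 = n / 2 ^ (s + 3) := by
    rw [Nat.div_div_eq_div_mul]
    congr 1
    rw [pow_add]; norm_num
  have h1 := Nat.div_add_mod n (2 ^ s)
  have h2 := Nat.div_add_mod (n / 2 ^ s) 8
  rw [h3] at h2
  have hpow : (2:Nat) ^ (s + 3) = 2 ^ s * 8 := by rw [pow_add]; norm_num
  calc n = 2 ^ s * (n / 2 ^ s) + n % 2 ^ s := h1.symm
    _ = 2 ^ s * (8 * (n / 2 ^ (s + 3)) + n / 2 ^ s % 8) + n % 2 ^ s := by rw [h2]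
    _ = n / 2 ^ (s + 3) * 2 ^ (s + 3) + n / 2 ^ s % 8 * 2 ^ s + n % 2 ^ s := by rw [hpow]; ring

lemma natOrAbsorb (f s : Nat) (hf : f < 8) : (f <<< s) ||| (7 <<< s) = 7 <<< s := by
  apply Nat.eq_of_testBit_eq
  intro i
  simp only [Nat.testBit_or, Nat.testBit_shiftLeft, test7, ge_iff_le]
  by_cases h1 : s ≤ i
  · simp only [h1, decide_true, Bool.true_and]
    by_cases h2 : i - s < 3
    · simp [h2]
    · simp [h2, testBitLt8 f (i - s) hf (by omega)]
  · simp [h1]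

lemma natOrFull7 (n s : Nat) :
    n ||| (7 <<< s) = n / 2 ^ (s + 3) * 2 ^ (s + 3) + 7 * 2 ^ s + n % 2 ^ s := by
  have hf8 : n / 2 ^ s % 8 < 8 := Nat.mod_lt _ (by norm_num)
  have hlo : n % 2 ^ s < 2 ^ s := Nat.mod_lt _ (Nat.pow_pos (by norm_num))
  conv_lhs => rw [natDecomp n s]
  rw [← natOrGen (n / 2 ^ (s + 3)) (n % 2 ^ s) (n / 2 ^ s % 8) s hlo hf8,
    Nat.or_assoc, natOrAbsorb _ s hf8]
  exact natOrGen _ _ 7 s hlo (by norm_num)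

lemma natFieldAnd (n s b : Nat) (hb : b < 8) :
    (n ||| (7 <<< s)) &&& (b <<< s) = b <<< s := by
  apply Nat.eq_of_testBit_eq
  intro i
  simp only [Nat.testBit_and, Nat.testBit_or, Nat.testBit_shiftLeft, test7, ge_iff_le]
  by_cases h1 : s ≤ i
  · simp only [h1, decide_true, Bool.true_and]
    cases hbt : b.testBit (i - s)
    · simp
    · have h2 : i - s < 3 := by
        by_contra hc
        rw [testBitLt8 b (i - s) hb (by omega)] at hbt
        exact Bool.false_ne_true hbt
      simp [h2]
  · simp [h1]

-- ---- Int bridge ----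

lemma intNotCast (k : Nat) : Int.not (k : Int) = -(k : Int) - 1 := by
  have h1 : Int.not ((k : Int)) = Int.negSucc k := rfl
  rw [h1, Int.negSucc_eq]; ring

lemma intShl (b : Int) (s : Nat) : b <<< s = b * 2 ^ s := Int.shiftLeft_eq b s

lemma band7 (a : Int) : PySem.Int.band a 7 = a % 8 := by
  by_cases h : 0 ≤ a
  · simp only [PySem.Int.band, if_pos h, if_pos (show (0:Int) ≤ 7 by norm_num)]
    rw [show (7:Int).toNat = 7 from rfl, show (7:Nat) = 2 ^ 3 - 1 from rfl,
      Nat.and_two_pow_sub_one_eq_mod, show (2:Nat) ^ 3 = 8 from rfl]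
    omega
  · simp only [PySem.Int.band, if_neg h, if_pos (show (0:Int) ≤ 7 by norm_num)]
    rw [show (7:Int).toNat = 7 from rfl, Nat.and_comm, show (7:Nat) = 2 ^ 3 - 1 from rfl,
      Nat.and_two_pow_sub_one_eq_mod, show (2:Nat) ^ 3 = 8 from rfl]
    omega

lemma negDivmod (m p : Nat) (hp : 0 < p) :
    (-(↑m + 1) : Int) / ↑p = -↑(m / p) - 1 ∧ (-(↑m + 1) : Int) % ↑p = ↑p - 1 - ↑(m % p) := by
  have hdm := Nat.mod_add_div m p
  have hmp : m % p < p := Nat.mod_lt _ hp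
  refine (Int.ediv_emod_unique (a := (-(↑m + 1) : Int)) (b := (p:Int))
      (q := -↑(m / p) - 1) (r := (p:Int) - 1 - ↑(m % p)) (by exact_mod_cast hp)).mpr ⟨?_, by push_cast; omega, by push_cast; omega⟩
  push_cast
  linear_combination (-1 : Int) * Int.ediv_add_emod (m:Int) (p:Int)

lemma setdArith (h d : Int) (s : Nat) :
    PySem.Int.bor (PySem.Int.band h (Int.not ((7 : Int) <<< s))) ((PySem.Int.band d 7) <<< s)
      = h + (d % 8 - h / 2 ^ s % 8) * 2 ^ s := by
  have hb0 : 0 ≤ d % 8 := Int.emod_nonneg d (by norm_num)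
  have hb8 : d % 8 < 8 := Int.emod_lt_of_pos d (by norm_num)
  set bn : Nat := (d % 8).toNat with hbndef
  have hbn : (bn : Int) = d % 8 := Int.toNat_of_nonneg hb0
  have hbn8 : bn < 8 := by omega
  have hshl : (PySem.Int.band d 7) <<< s = ((bn <<< s : Nat) : Int) := by
    rw [band7, intShl, ← hbn]
    push_cast [Nat.shiftLeft_eq]
    ring
  have h7s : ((7 <<< s : Nat) : Int) = (7:Int) <<< s := by
    rw [intShl]
    push_cast [Nat.shiftLeft_eq]
    ring
  have hnot : Int.not ((7 : Int) <<< s) = -((7 <<< s : Nat) : Int) - 1 := by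
    rw [← h7s, intNotCast]
  have hnotneg : ¬ (0:Int) ≤ Int.not ((7:Int) <<< s) := by
    have := Int.natCast_nonneg (7 <<< s : Nat)
    omega
  have harg : (-(Int.not ((7:Int) <<< s)) - 1).toNat = 7 <<< s := by
    rw [hnot]
    omega
  by_cases hh : 0 ≤ h
  · set n : Nat := h.toNat with hndef
    have hn : (n : Int) = h := Int.toNat_of_nonneg hh
    have hband : PySem.Int.band h (Int.not ((7:Int) <<< s)) = ((n - (n &&& (7 <<< s)) : Nat) : Int) := by
      simp only [PySem.Int.band, if_pos hh, if_neg hnotneg, harg]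
      rw [hndef]
    have hclr : (n - (n &&& (7 <<< s)) : Nat) = n / 2 ^ (s + 3) * 2 ^ (s + 3) + n % 2 ^ s := by
      rw [natK1, Nat.shiftLeft_eq, Nat.shiftRight_eq_div_pow]
      have hdec := natDecomp n s
      set A := n / 2 ^ (s + 3) * 2 ^ (s + 3) with hA
      set B := n / 2 ^ s % 8 * 2 ^ s with hB
      omega
    have hbor : PySem.Int.bor (((n - (n &&& (7 <<< s)) : Nat)) : Int) (((bn <<< s : Nat)) : Int)
        = ((((n - (n &&& (7 <<< s))) ||| (bn <<< s) : Nat)) : Int) := by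
      simp only [PySem.Int.bor, if_pos (Int.natCast_nonneg (n - (n &&& (7 <<< s)))),
        if_pos (Int.natCast_nonneg (bn <<< s)), Int.toNat_natCast]
    rw [hshl, hband, hbor, hclr,
      natOrGen _ _ bn s (Nat.mod_lt _ (Nat.pow_pos (by norm_num))) hbn8]
    have hdecI := congrArg (fun z : Nat => (z : Int)) (natDecomp n s)
    push_cast at hdecI
    rw [← hn, ← hbn]
    push_cast
    linear_combination (-1 : Int) * hdecI
  · set m : Nat := (-h - 1).toNat with hmdef
    have hm : (m : Int) = -h - 1 := by omega
    have hband : PySem.Int.band h (Int.not ((7:Int) <<< s))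
        = -(((m ||| (7 <<< s)) : Nat) : Int) - 1 := by
      simp only [PySem.Int.band, if_neg hh, if_neg hnotneg, harg]
      rw [hmdef]
    have hxneg : ¬ (0:Int) ≤ -(((m ||| (7 <<< s)) : Nat) : Int) - 1 := by
      have := Int.natCast_nonneg (m ||| (7 <<< s))
      omega
    have hful : (-(-(((m ||| (7 <<< s)) : Nat) : Int) - 1) - 1).toNat = (m ||| (7 <<< s)) := by
      omega
    have hbor : PySem.Int.bor (-(((m ||| (7 <<< s)) : Nat) : Int) - 1) (((bn <<< s : Nat)) : Int)
        = -((((m ||| (7 <<< s)) - ((m ||| (7 <<< s)) &&& (bn <<< s)) : Nat)) : Int) - 1 := by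
      simp only [PySem.Int.bor, if_neg hxneg, if_pos (Int.natCast_nonneg (bn <<< s)),
        Int.toNat_natCast, hful]
    rw [hshl, hband, hbor, natFieldAnd m s bn hbn8]
    have hsub : (m ||| (7 <<< s)) - (bn <<< s)
        = m / 2 ^ (s + 3) * 2 ^ (s + 3) + (7 - bn) * 2 ^ s + m % 2 ^ s := by
      rw [natOrFull7, Nat.shiftLeft_eq]
      have h1 : (7 - bn) * 2 ^ s = 7 * 2 ^ s - bn * 2 ^ s := Nat.sub_mul 7 bn (2 ^ s)
      have h2 : bn * 2 ^ s ≤ 7 * 2 ^ s := Nat.mul_le_mul_right _ (by omega)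
      set A := m / 2 ^ (s + 3) * 2 ^ (s + 3) with hA
      set B1 := bn * 2 ^ s with hB1
      set B2 := (7 - bn) * 2 ^ s with hB2
      set C := 7 * 2 ^ s with hC
      set L := m % 2 ^ s with hL
      omega
    rw [hsub]
    have hpowpos : 0 < 2 ^ s := Nat.pow_pos (show 0 < 2 by norm_num)
    have hdiv1 : h / 2 ^ s = -((m / 2 ^ s : Nat) : Int) - 1 := by
      have h1 := (negDivmod m (2 ^ s) hpowpos).1
      rw [show (((2 ^ s : Nat)) : Int) = (2:Int) ^ s by push_cast; ring] at h1
      rw [show h = -((m:Int) + 1) by omega]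
      exact h1
    have hdig : h / 2 ^ s % 8 = 7 - ((m / 2 ^ s % 8 : Nat) : Int) := by
      rw [hdiv1]
      have h2 := (negDivmod (m / 2 ^ s) 8 (by norm_num)).2
      rw [show (((8 : Nat)) : Int) = (8:Int) by norm_num] at h2
      rw [show -((m / 2 ^ s : Nat) : Int) - 1 = -(((m / 2 ^ s : Nat) : Int) + 1) by ring, h2]
      norm_num
    have hdecI := congrArg (fun z : Nat => (z : Int)) (natDecomp m s)
    push_cast at hdecI
    rw [hdig, ← hbn, show h = -((m:Int) + 1) by omega]
    push_cast [Nat.cast_sub (show bn ≤ 7 by omega)]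
    linear_combination hdecI

-- ---- port-level digit characterizations ----

lemma getdEq (h r : Int) : pyGetDigit h r = h / 2 ^ (S r) % 8 := by
  unfold pyGetDigit S
  rw [band7, Int.shiftRight_eq_div_pow]
  push_cast
  ring_nf

lemma setdEq (h r d : Int) : pySetDigit h r d = h + (d % 8 - h / 2 ^ (S r) % 8) * 2 ^ (S r) := by
  unfold pySetDigit S
  exact setdArith h d _

lemma intDecomp (x : Int) (s : Nat) :
    x = x / 2 ^ (s + 3) * 2 ^ (s + 3) + (x / 2 ^ s % 8) * 2 ^ s + x % 2 ^ s := by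
  have h3 : x / 2 ^ s / 8 = x / 2 ^ (s + 3) := by
    rw [Int.ediv_ediv_eq_ediv_mul (by positivity)]
    congr 1
    rw [pow_add]; norm_num
  have h1 := Int.ediv_add_emod x (2 ^ s)
  have h2 := Int.ediv_add_emod (x / 2 ^ s) 8
  rw [h3] at h2
  have hpow := pow2_add3 s
  calc x = 2 ^ s * (x / 2 ^ s) + x % 2 ^ s := h1.symm
    _ = 2 ^ s * (8 * (x / 2 ^ (s + 3)) + x / 2 ^ s % 8) + x % 2 ^ s := by rw [h2]
    _ = x / 2 ^ (s + 3) * 2 ^ (s + 3) + (x / 2 ^ s % 8) * 2 ^ s + x % 2 ^ s := by rw [hpow]; ring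

lemma digSelf (x : Int) (s : Nat) (b : Int) (hb0 : 0 ≤ b) (hb8 : b < 8) :
    (x + (b - x / 2 ^ s % 8) * 2 ^ s) / 2 ^ s % 8 = b := by
  rw [Int.add_mul_ediv_right _ _ (ne_of_gt (pow2_pos s))]
  have h2 := Int.ediv_add_emod (x / 2 ^ s) 8
  rw [show x / 2 ^ s + (b - x / 2 ^ s % 8) = b + 8 * (x / 2 ^ s / 8) by linarith,
    Int.add_mul_emod_self_left]
  exact Int.emod_eq_of_lt hb0 hb8

lemma divHigh (x : Int) (s t : Nat) (b : Int) (hb0 : 0 ≤ b) (hb8 : b < 8) (hst : s + 3 ≤ t) :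
    (x + (b - x / 2 ^ s % 8) * 2 ^ s) / 2 ^ t = x / 2 ^ t := by
  have hpow := pow2_add3 s
  have hre : x + (b - x / 2 ^ s % 8) * 2 ^ s
      = (b * 2 ^ s + x % 2 ^ s) + x / 2 ^ (s + 3) * 2 ^ (s + 3) := by
    linear_combination intDecomp x s
  have hr0 : 0 ≤ b * 2 ^ s + x % 2 ^ s :=
    add_nonneg (mul_nonneg hb0 (le_of_lt (pow2_pos s))) (Int.emod_nonneg x (ne_of_gt (pow2_pos s)))
  have hrlt : b * 2 ^ s + x % 2 ^ s < 2 ^ (s + 3) := by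
    have h1 : x % 2 ^ s < 2 ^ s := Int.emod_lt_of_pos x (pow2_pos s)
    have h2 : b * 2 ^ s ≤ 7 * 2 ^ s := by nlinarith [pow2_pos s]
    rw [hpow]; nlinarith
  have ht : (2:Int) ^ t = 2 ^ (s + 3) * 2 ^ (t - (s + 3)) := by
    rw [← pow_add]; congr 1; omega
  rw [ht, ← Int.ediv_ediv_eq_ediv_mul (by positivity), ← Int.ediv_ediv_eq_ediv_mul (by positivity),
    hre, Int.add_mul_ediv_right _ _ (ne_of_gt (pow2_pos (s + 3))),
    Int.ediv_eq_zero_of_lt hr0 hrlt, zero_add]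

lemma digLow (x : Int) (s s' : Nat) (c : Int) (hss' : s' + 3 ≤ s) :
    (x + c * 2 ^ s) / 2 ^ s' % 8 = x / 2 ^ s' % 8 := by
  have hs : (2:Int) ^ s = 2 ^ (s - (s' + 3)) * 2 ^ (s' + 3) := by
    rw [← pow_add]; congr 1; omega
  have h8 := pow2_add3 s'
  rw [show x + c * 2 ^ s = x + (c * 2 ^ (s - (s' + 3)) * 8) * 2 ^ s' by rw [hs, h8]; ring,
    Int.add_mul_ediv_right _ _ (ne_of_gt (pow2_pos s')),
    show x / 2 ^ s' + c * 2 ^ (s - (s' + 3)) * 8 = x / 2 ^ s' + 8 * (c * 2 ^ (s - (s' + 3))) by ring,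
    Int.add_mul_emod_self_left]

-- getd is a 3-bit field
lemma getdBounds (h r : Int) : 0 ≤ pyGetDigit h r ∧ pyGetDigit h r < 8 := by
  rw [getdEq]
  exact ⟨Int.emod_nonneg _ (by norm_num), Int.emod_lt_of_pos _ (by norm_num)⟩

lemma rotDFacts (v : Int) (h0 : 0 ≤ v) (h8 : v < 8) :
    0 ≤ pyRotDigit v ∧ pyRotDigit v < 8 ∧ (pyRotDigit v = 0 ↔ v = 0) := by
  interval_cases v <;> decide

lemma rotDMod (v : Int) (h0 : 0 ≤ v) (h8 : v < 8) : pyRotDigit v % 8 = pyRotDigit v :=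
  Int.emod_eq_of_lt (rotDFacts v h0 h8).1 (rotDFacts v h0 h8).2.1

-- S-separation facts
lemma S_high (r : Int) (h1 : 1 ≤ r) (h15 : r ≤ 15) : S r + 3 ≤ 45 := by unfold S; omega

lemma S_sep (r r' : Int) (h1 : 1 ≤ r) (h2 : r < r') (h3 : r' ≤ 15) : S r' + 3 ≤ S r := by
  unfold S; omega

-- one rotation step
lemma stepR_self (x r : Int) :
    stepR x r / 2 ^ (S r) % 8 = pyRotDigit (x / 2 ^ (S r) % 8) := by
  unfold stepR
  rw [setdEq, getdEq]
  have hb := getdBounds x r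
  rw [getdEq] at hb
  rw [show pyRotDigit (x / 2 ^ (S r) % 8) % 8 = pyRotDigit (x / 2 ^ (S r) % 8) from
    rotDMod _ hb.1 hb.2]  -- normalize the written digit
  · exact digSelf x (S r) _ (rotDFacts _ hb.1 hb.2).1 (rotDFacts _ hb.1 hb.2).2.1

lemma stepR_ne (x r d r' : Int) (h1 : 1 ≤ r) (h15 : r ≤ 15) (h1' : 1 ≤ r') (h15' : r' ≤ 15)
    (hne : r ≠ r') :
    pySetDigit x r d / 2 ^ (S r') % 8 = x / 2 ^ (S r') % 8 := by
  rw [setdEq]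
  rcases lt_or_gt_of_ne hne with hlt | hgt
  · exact digLow x (S r) (S r') _ (S_sep r r' h1 hlt h15')
  · rw [divHigh x (S r) (S r') (d % 8) (Int.emod_nonneg d (by norm_num))
      (Int.emod_lt_of_pos d (by norm_num)) (S_sep r' r h1' hgt h15)]

lemma stepR_div45 (x r d : Int) (h1 : 1 ≤ r) (h15 : r ≤ 15) :
    pySetDigit x r d / 2 ^ 45 = x / 2 ^ 45 := by
  rw [setdEq]
  exact divHigh x (S r) 45 (d % 8) (Int.emod_nonneg d (by norm_num))
    (Int.emod_lt_of_pos d (by norm_num)) (S_high r h1 h15)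

-- empty ranges
lemma pyRangeNil (a b : Int) (h : b ≤ a) : PySem.List.pyRange a b = [] :=
  PySem.List.pyRange_one_eq_nil h

lemma rotSucc (h u : Int) (hu : 0 ≤ u) :
    pyRotate60cw h (u + 1) = stepR (pyRotate60cw h u) (u + 1) := by
  unfold pyRotate60cw
  rw [PySem.List.pyRange_one_succ_right (by omega : (1:Int) ≤ u + 1), List.foldl_append]
  rfl

lemma foldASucc (h_ res u : Int) (hu : 0 ≤ u) :
    foldA h_ res (u + 1) = stepA res (foldA h_ res u) (u + 1) := by
  unfold foldA
  rw [PySem.List.pyRange_one_succ_right (by omega : (1:Int) ≤ u + 1), List.foldl_append]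
  rfl

-- full rotation characterization
lemma rotChar : ∀ (n : Nat) (res : Int), res.toNat = n → res ≤ 15 → ∀ h : Int,
    (pyRotate60cw h res) / 2 ^ 45 = h / 2 ^ 45 ∧
    (∀ r : Int, 1 ≤ r → r ≤ 15 →
      pyRotate60cw h res / 2 ^ (S r) % 8 =
        if r ≤ res then pyRotDigit (h / 2 ^ (S r) % 8) else h / 2 ^ (S r) % 8) := by
  intro n
  induction n with
  | zero =>
    intro res hres h15 h
    have hid : pyRotate60cw h res = h := by
      unfold pyRotate60cw
      rw [pyRangeNil _ _ (by omega)]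
      rfl
    rw [hid]
    exact ⟨rfl, fun r h1 h15' => by rw [if_neg (by omega)]⟩
  | succ k ih =>
    intro res hres h15 h
    obtain ⟨u, rfl⟩ : ∃ u, res = u + 1 := ⟨res - 1, by ring⟩
    have hu0 : 0 ≤ u := by omega
    have huk : u.toNat = k := by omega
    have hu15 : u ≤ 15 := by omega
    obtain ⟨ihdiv, ihdig⟩ := ih u huk hu15 h
    rw [rotSucc h u hu0]
    constructor
    · rw [show stepR (pyRotate60cw h u) (u+1) = pySetDigit (pyRotate60cw h u) (u+1)
          (pyRotDigit (pyGetDigit (pyRotate60cw h u) (u+1))) from rfl,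
        stepR_div45 _ _ _ (by omega) (by omega), ihdiv]
    · intro r h1 h15'
      by_cases hr : r = u + 1
      · subst hr
        rw [stepR_self, ihdig (u+1) (by omega) (by omega), if_neg (by omega), if_pos (by omega)]
      · rw [show stepR (pyRotate60cw h u) (u+1) = pySetDigit (pyRotate60cw h u) (u+1)
            (pyRotDigit (pyGetDigit (pyRotate60cw h u) (u+1))) from rfl,
          stepR_ne _ _ _ _ (by omega) (by omega) h1 h15' (by omega),
          ihdig r h1 h15']
        by_cases hle : r ≤ u
        · rw [if_pos hle, if_pos (by omega)]
        · rw [if_neg hle, if_neg (by omega)]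

-- leading-nonzero-digit characterization (A side, first non-zero position)
lemma leadFirst : ∀ (n : Nat) (x a stop r0 : Int), (stop - a).toNat = n →
    a ≤ r0 → r0 < stop →
    (∀ r : Int, a ≤ r → r < r0 → pyGetDigit x r = 0) →
    pyGetDigit x r0 ≠ 0 →
    pyLeadNZGo x (PySem.List.pyRange a stop) = pyGetDigit x r0 := by
  intro n
  induction n with
  | zero => intro x a stop r0 h0 h1 h2 _ _; omega
  | succ k ih =>
    intro x a stop r0 hk h1 h2 hz hnz
    rw [PySem.List.pyRange_one_cons (by omega)]
    by_cases har : a = r0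
    · subst har
      rw [show pyLeadNZGo x (a :: PySem.List.pyRange (a+1) stop)
          = if pyGetDigit x a ≠ 0 then pyGetDigit x a
            else pyLeadNZGo x (PySem.List.pyRange (a+1) stop) from rfl,
        if_pos hnz]
    · have hza := hz a (le_refl a) (by omega)
      rw [show pyLeadNZGo x (a :: PySem.List.pyRange (a+1) stop)
          = if pyGetDigit x a ≠ 0 then pyGetDigit x a
            else pyLeadNZGo x (PySem.List.pyRange (a+1) stop) from rfl,
        if_neg (by simp [hza])]
      exact ih x (a+1) stop r0 (by omega) (by omega) h2
        (fun r hr1 hr2 => hz r (by omega) hr2) hnz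

-- extensionality by digits
lemma extDig : ∀ (n : Nat) (x y : Int), x / 2 ^ (3 * n) = y / 2 ^ (3 * n) →
    (∀ i : Nat, i < n → x / 2 ^ (3 * i) % 8 = y / 2 ^ (3 * i) % 8) → x = y := by
  intro n
  induction n with
  | zero =>
    intro x y hdiv _
    simpa using hdiv
  | succ k ih =>
    intro x y hdiv hdig
    refine ih x y ?_ (fun i hi => hdig i (by omega))
    have e : ∀ z : Int, z / 2 ^ (3 * k) = 8 * (z / 2 ^ (3 * (k + 1))) + z / 2 ^ (3 * k) % 8 := by
      intro z
      have h3 : z / 2 ^ (3 * k) / 8 = z / 2 ^ (3 * (k + 1)) := by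
        rw [Int.ediv_ediv_eq_ediv_mul (by positivity)]
        congr 1
        rw [show 3 * (k + 1) = 3 * k + 3 by ring, pow_add]; norm_num
      have h2 := Int.ediv_add_emod (z / 2 ^ (3 * k)) 8
      rw [h3] at h2
      exact h2.symm
    rw [e x, e y, hdiv, hdig k (by omega)]

lemma ext15 (x y : Int) (hdiv : x / 2 ^ 45 = y / 2 ^ 45)
    (hdig : ∀ r : Int, 1 ≤ r → r ≤ 15 → x / 2 ^ (S r) % 8 = y / 2 ^ (S r) % 8) : x = y := by
  refine extDig 15 x y (by norm_num at hdiv ⊢; exact hdiv) ?_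
  intro i hi
  have hr := hdig (15 - (i:Int)) (by omega) (by omega)
  have hS : S (15 - (i:Int)) = 3 * i := by unfold S; omega
  rwa [hS] at hr

-- the A-loop invariant
lemma invA (h_ res : Int) (hres15 : res ≤ 15) :
    ∀ (n : Nat) (t : Int), t.toNat = n → 0 ≤ t → t ≤ res →
    ((∀ r : Int, 1 ≤ r → r ≤ t → h_ / 2 ^ (S r) % 8 = 0) ∧ foldA h_ res t = (false, h_))
    ∨ (∃ r0 : Int, 1 ≤ r0 ∧ r0 ≤ t ∧
        (∀ r : Int, 1 ≤ r → r < r0 → h_ / 2 ^ (S r) % 8 = 0) ∧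
        h_ / 2 ^ (S r0) % 8 ≠ 0 ∧
        (foldA h_ res t).1 = true ∧
        (foldA h_ res t).2 / 2 ^ 45 = h_ / 2 ^ 45 ∧
        (∀ r : Int, 1 ≤ r → r ≤ 15 →
          (foldA h_ res t).2 / 2 ^ (S r) % 8 =
            if pyRotDigit (h_ / 2 ^ (S r0) % 8) = 1 then
              (if r ≤ t then rot2 (h_ / 2 ^ (S r) % 8)
               else if r ≤ res then pyRotDigit (h_ / 2 ^ (S r) % 8) else h_ / 2 ^ (S r) % 8)
            else
              (if r ≤ t then pyRotDigit (h_ / 2 ^ (S r) % 8) else h_ / 2 ^ (S r) % 8))) := by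
  intro n
  induction n with
  | zero =>
    intro t ht h0 _
    have ht0 : t = 0 := by omega
    subst ht0
    left
    refine ⟨fun r h1 h2 => by omega, ?_⟩
    unfold foldA
    rw [pyRangeNil _ _ (by omega)]
    rfl
  | succ k ih =>
    intro t ht h0 htres
    obtain ⟨u, rfl⟩ : ∃ u, t = u + 1 := ⟨t - 1, by ring⟩
    have hu0 : 0 ≤ u := by omega
    have huk : u.toNat = k := by omega
    have hures : u ≤ res := by omega
    have hu115 : (1:Int) ≤ u + 1 := by omega
    have hu15 : u + 1 ≤ 15 := by omega
    rw [foldASucc h_ res u hu0]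
    rcases ih u huk hu0 hures with ⟨hzero, heq⟩ | ⟨r0, hr01, hr0u, hpre, hnz, hfd, hdiv, hdigs⟩
    · rw [heq]
      simp only [stepA]
      have hgx : pyGetDigit (stepR h_ (u+1)) (u+1) = pyRotDigit (h_ / 2 ^ (S (u+1)) % 8) := by
        rw [getdEq, stepR_self]
      by_cases hz1 : h_ / 2 ^ (S (u+1)) % 8 = 0
      · have hrot0 : pyRotDigit (h_ / 2 ^ (S (u+1)) % 8) = 0 := by rw [hz1]; decide
        have hxh : stepR h_ (u+1) = h_ := by
          rw [show stepR h_ (u+1)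
              = pySetDigit h_ (u+1) (pyRotDigit (pyGetDigit h_ (u+1))) from rfl,
            setdEq, getdEq, hz1, show pyRotDigit 0 % 8 = (0:Int) from by decide]
          norm_num
        rw [if_neg (by rw [hgx, hrot0]; simp)]
        left
        refine ⟨?_, ?_⟩
        · intro r h1 h2
          by_cases hr : r ≤ u
          · exact hzero r h1 hr
          · have hreq : r = u + 1 := by omega
            rw [hreq]; exact hz1
        · rw [hxh]
      · have hb0 : 0 ≤ h_ / 2 ^ (S (u+1)) % 8 := Int.emod_nonneg _ (by norm_num)
        have hb8 : h_ / 2 ^ (S (u+1)) % 8 < 8 := Int.emod_lt_of_pos _ (by norm_num)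
        have hrnz : pyRotDigit (h_ / 2 ^ (S (u+1)) % 8) ≠ 0 :=
          fun hcon => hz1 ((rotDFacts _ hb0 hb8).2.2.mp hcon)
        have hxdig : ∀ r : Int, 1 ≤ r → r ≤ 15 →
            stepR h_ (u+1) / 2 ^ (S r) % 8 =
              if r = u + 1 then pyRotDigit (h_ / 2 ^ (S (u+1)) % 8) else h_ / 2 ^ (S r) % 8 := by
          intro r h1 h15'
          by_cases hr : r = u + 1
          · subst hr; rw [if_pos rfl, stepR_self]
          · rw [if_neg hr,
              show stepR h_ (u+1)
                = pySetDigit h_ (u+1) (pyRotDigit (pyGetDigit h_ (u+1))) from rfl,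
              stepR_ne _ _ _ _ hu115 hu15 h1 h15' (by omega)]
        have hlead : pyLeadingNonzeroDigit (stepR h_ (u+1)) res
            = pyRotDigit (h_ / 2 ^ (S (u+1)) % 8) := by
          unfold pyLeadingNonzeroDigit
          have hlf := leadFirst ((res + 1) - 1).toNat (stepR h_ (u+1)) 1 (res+1) (u+1) rfl
            (by omega) (by omega)
            (fun r hr1 hr2 => by
              rw [getdEq, hxdig r hr1 (by omega), if_neg (by omega)]
              exact hzero r hr1 (by omega))
            (by rw [hgx]; exact hrnz)
          rw [hlf, hgx]
        rw [if_pos ⟨by trivial, by rw [hgx]; exact hrnz⟩]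
        right
        refine ⟨u + 1, by omega, le_refl _, fun r h1 h2 => hzero r h1 (by omega), hz1, ?_, ?_, ?_⟩
        · by_cases hc : pyRotDigit (h_ / 2 ^ (S (u+1)) % 8) = 1 <;> rfl
        · rw [hlead]
          by_cases hc : pyRotDigit (h_ / 2 ^ (S (u+1)) % 8) = 1
          · rw [if_pos hc]
            show pyRotate60cw (stepR h_ (u+1)) res / 2 ^ 45 = h_ / 2 ^ 45
            obtain ⟨hrdiv, _⟩ := rotChar res.toNat res rfl hres15 (stepR h_ (u+1))
            rw [hrdiv,
              show stepR h_ (u+1)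
                = pySetDigit h_ (u+1) (pyRotDigit (pyGetDigit h_ (u+1))) from rfl,
              stepR_div45 _ _ _ hu115 hu15]
          · rw [if_neg hc]
            show stepR h_ (u+1) / 2 ^ 45 = h_ / 2 ^ 45
            rw [show stepR h_ (u+1)
                = pySetDigit h_ (u+1) (pyRotDigit (pyGetDigit h_ (u+1))) from rfl,
              stepR_div45 _ _ _ hu115 hu15]
        · intro r h1 h15'
          rw [hlead]
          by_cases hc : pyRotDigit (h_ / 2 ^ (S (u+1)) % 8) = 1
          · rw [if_pos hc, if_pos hc]
            show pyRotate60cw (stepR h_ (u+1)) res / 2 ^ (S r) % 8 = _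
            obtain ⟨_, hrdig⟩ := rotChar res.toNat res rfl hres15 (stepR h_ (u+1))
            rw [hrdig r h1 h15']
            by_cases hrr : r ≤ res
            · rw [if_pos hrr, hxdig r h1 h15']
              by_cases hr : r = u + 1
              · subst hr
                rw [if_pos rfl, if_pos (le_refl _)]
                rfl
              · rw [if_neg hr]
                by_cases hru : r ≤ u + 1
                · rw [if_pos hru, hzero r h1 (by omega)]
                  decide
                · rw [if_neg hru, if_pos hrr]
            · rw [if_neg hrr, hxdig r h1 h15', if_neg (by omega), if_neg (by omega), if_neg hrr]
          · rw [if_neg hc, if_neg hc]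
            show stepR h_ (u+1) / 2 ^ (S r) % 8 = _
            rw [hxdig r h1 h15']
            by_cases hr : r = u + 1
            · subst hr
              rw [if_pos rfl, if_pos (le_refl _)]
            · rw [if_neg hr]
              by_cases hru : r ≤ u + 1
              · rw [if_pos hru, hzero r h1 (by omega)]
                decide
              · rw [if_neg hru]
    · simp only [stepA]
      rw [if_neg (by rw [hfd]; simp)]
      right
      refine ⟨r0, hr01, by omega, hpre, hnz, ?_, ?_, ?_⟩
      · show (foldA h_ res u).1 = true
        exact hfd
      · show stepR (foldA h_ res u).2 (u+1) / 2 ^ 45 = h_ / 2 ^ 45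
        rw [show stepR (foldA h_ res u).2 (u+1)
            = pySetDigit (foldA h_ res u).2 (u+1)
                (pyRotDigit (pyGetDigit (foldA h_ res u).2 (u+1))) from rfl,
          stepR_div45 _ _ _ hu115 hu15]
        exact hdiv
      · intro r h1 h15'
        show stepR (foldA h_ res u).2 (u+1) / 2 ^ (S r) % 8 = _
        by_cases hr : r = u + 1
        · subst hr
          rw [stepR_self, hdigs (u+1) hu115 hu15]
          by_cases hc : pyRotDigit (h_ / 2 ^ (S r0) % 8) = 1
          · rw [if_pos hc, if_pos hc, if_neg (show ¬ (u+1:Int) ≤ u by omega),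
              if_pos (show (u+1:Int) ≤ res by omega), if_pos (le_refl (u+1:Int))]
            rfl
          · rw [if_neg hc, if_neg hc, if_neg (show ¬ (u+1:Int) ≤ u by omega),
              if_pos (le_refl (u+1:Int))]
        · rw [show stepR (foldA h_ res u).2 (u+1)
              = pySetDigit (foldA h_ res u).2 (u+1)
                  (pyRotDigit (pyGetDigit (foldA h_ res u).2 (u+1))) from rfl,
            stepR_ne _ _ _ _ hu115 hu15 h1 h15' (by omega), hdigs r h1 h15']
          by_cases hc : pyRotDigit (h_ / 2 ^ (S r0) % 8) = 1
          · rw [if_pos hc, if_pos hc]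
            by_cases hru : r ≤ u
            · rw [if_pos hru, if_pos (show r ≤ u + 1 by omega)]
            · rw [if_neg hru, if_neg (show ¬ r ≤ u + 1 by omega)]
          · rw [if_neg hc, if_neg hc]
            by_cases hru : r ≤ u
            · rw [if_pos hru, if_pos (show r ≤ u + 1 by omega)]
            · rw [if_neg hru, if_neg (show ¬ r ≤ u + 1 by omega)]

-- ---- B-side lemmas ----

lemma map_zip_triple (L : List Int) (D G : List Int) (f g : Int → Int)
    (hD : D = L.map f) (hG : G = L.map g) :
    L.zip (D.zip G) = L.map (fun r => (r, f r, g r)) := by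
  subst hD hG
  induction L with
  | nil => rfl
  | cons a t ih => simp [ih]

lemma altRotD_eq (d : Int) (h0 : 0 ≤ d) (h8 : d < 8) : altRotD d = pyRotDigit d := by
  interval_cases d <;> decide

lemma digBounds (h : Int) (s : Nat) : 0 ≤ h / 2 ^ s % 8 ∧ h / 2 ^ s % 8 < 8 :=
  ⟨Int.emod_nonneg _ (by norm_num), Int.emod_lt_of_pos _ (by norm_num)⟩

lemma altDigits_eq (h res : Int) :
    altDigits h res = (PySem.List.pyRange 1 (res + 1)).map (fun r => h / 2 ^ (S r) % 8) := by
  unfold altDigits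
  exact List.map_congr_left (fun r _ => getdEq h r)

lemma altRot0_eq (h : Int) (L : List Int) :
    (L.map (fun r => h / 2 ^ (S r) % 8)).map altRotD
      = L.map (fun r => pyRotDigit (h / 2 ^ (S r) % 8)) := by
  rw [List.map_map]
  exact List.map_congr_left (fun r _ =>
    altRotD_eq _ (digBounds h (S r)).1 (digBounds h (S r)).2)

lemma altRot1_eq (h : Int) (L : List Int) :
    (L.map (fun r => pyRotDigit (h / 2 ^ (S r) % 8))).map altRotD
      = L.map (fun r => rot2 (h / 2 ^ (S r) % 8)) := by
  rw [List.map_map]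
  refine List.map_congr_left (fun r _ => ?_)
  have hb := digBounds h (S r)
  exact altRotD_eq _ (rotDFacts _ hb.1 hb.2).1 (rotDFacts _ hb.1 hb.2).2.1

-- altLead on a mapped range
lemma altLeadAll0 : ∀ (n : Nat) (a stop : Int) (F : Int → Int), (stop - a).toNat = n →
    (∀ r : Int, a ≤ r → r < stop → F r = 0) →
    altLead ((PySem.List.pyRange a stop).map F) = 0 := by
  intro n
  induction n with
  | zero =>
    intro a stop F h0 _
    rw [pyRangeNil _ _ (by omega)]
    rfl
  | succ k ih =>
    intro a stop F hk hz
    rw [PySem.List.pyRange_one_cons (by omega)]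
    have hza := hz a (le_refl a) (by omega)
    rw [List.map_cons,
      show altLead (F a :: (PySem.List.pyRange (a+1) stop).map F)
        = if F a ≠ 0 then F a else altLead ((PySem.List.pyRange (a+1) stop).map F) from rfl,
      if_neg (by simp [hza])]
    exact ih (a+1) stop F (by omega) (fun r hr1 hr2 => hz r (by omega) hr2)

lemma altLeadFirst : ∀ (n : Nat) (a stop r0 : Int) (F : Int → Int), (stop - a).toNat = n →
    a ≤ r0 → r0 < stop →
    (∀ r : Int, a ≤ r → r < r0 → F r = 0) → F r0 ≠ 0 →
    altLead ((PySem.List.pyRange a stop).map F) = F r0 := by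
  intro n
  induction n with
  | zero => intro a stop r0 F h0 h1 h2 _ _; omega
  | succ k ih =>
    intro a stop r0 F hk h1 h2 hz hnz
    rw [PySem.List.pyRange_one_cons (by omega), List.map_cons]
    by_cases har : a = r0
    · subst har
      rw [show altLead (F a :: (PySem.List.pyRange (a+1) stop).map F)
          = if F a ≠ 0 then F a else altLead ((PySem.List.pyRange (a+1) stop).map F) from rfl,
        if_pos hnz]
    · have hza := hz a (le_refl a) (by omega)
      rw [show altLead (F a :: (PySem.List.pyRange (a+1) stop).map F)
          = if F a ≠ 0 then F a else altLead ((PySem.List.pyRange (a+1) stop).map F) from rfl,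
        if_neg (by simp [hza])]
      exact ih (a+1) stop r0 F (by omega) (by omega) h2
        (fun r hr1 hr2 => hz r (by omega) hr2) hnz

-- characterization of the delta-sum reassembly
lemma sumChar (h : Int) (G : Int → Int)
    (hGb : ∀ r : Int, 1 ≤ r → r ≤ 15 → 0 ≤ G r ∧ G r < 8) :
    ∀ (n : Nat) (res : Int), res.toNat = n → res ≤ 15 →
    ((h + (PySem.List.pyRange 1 (res + 1)).foldl
        (fun acc r => acc + (G r - h / 2 ^ (S r) % 8) * 2 ^ (S r)) 0) / 2 ^ 45 = h / 2 ^ 45)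
    ∧ (∀ r : Int, 1 ≤ r → r ≤ 15 →
        (h + (PySem.List.pyRange 1 (res + 1)).foldl
          (fun acc r => acc + (G r - h / 2 ^ (S r) % 8) * 2 ^ (S r)) 0) / 2 ^ (S r) % 8 =
          if r ≤ res then G r else h / 2 ^ (S r) % 8) := by
  intro n
  induction n with
  | zero =>
    intro res hres h15
    rw [pyRangeNil _ _ (by omega)]
    simp only [List.foldl_nil, add_zero]
    exact ⟨trivial, fun r h1 h15' => by rw [if_neg (by omega)]⟩
  | succ k ih =>
    intro res hres h15
    obtain ⟨u, rfl⟩ : ∃ u, res = u + 1 := ⟨res - 1, by ring⟩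
    have hu0 : 0 ≤ u := by omega
    have huk : u.toNat = k := by omega
    have hu15 : u ≤ 15 := by omega
    obtain ⟨ihdiv, ihdig⟩ := ih u huk hu15
    have hb := hGb (u+1) (by omega) (by omega)
    set f : Int → Int → Int := fun acc r => acc + (G r - h / 2 ^ (S r) % 8) * 2 ^ (S r) with hf
    set x : Int := h + (PySem.List.pyRange 1 (u + 1)).foldl f 0 with hx
    have hsplit : h + (PySem.List.pyRange 1 (u + 1 + 1)).foldl f 0
        = x + (G (u+1) - h / 2 ^ (S (u+1)) % 8) * 2 ^ (S (u+1)) := by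
      rw [PySem.List.pyRange_one_succ_right (by omega : (1:Int) ≤ u + 1), List.foldl_append]
      simp only [List.foldl_cons, List.foldl_nil, hf]
      rw [hx]
      ring
    have hdigx : x / 2 ^ (S (u+1)) % 8 = h / 2 ^ (S (u+1)) % 8 := by
      rw [ihdig (u+1) (by omega) (by omega), if_neg (by omega)]
    have hre : x + (G (u+1) - h / 2 ^ (S (u+1)) % 8) * 2 ^ (S (u+1))
        = x + (G (u+1) - x / 2 ^ (S (u+1)) % 8) * 2 ^ (S (u+1)) := by rw [hdigx]
    constructor
    · rw [hsplit, hre, divHigh x (S (u+1)) 45 (G (u+1)) hb.1 hb.2 (S_high (u+1) (by omega) (by omega))]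
      exact ihdiv
    · intro r h1 h15'
      rw [hsplit, hre]
      by_cases hr : r = u + 1
      · subst hr
        rw [digSelf x (S (u+1)) (G (u+1)) hb.1 hb.2, if_pos (le_refl _)]
      · have hdigr : (x + (G (u+1) - x / 2 ^ (S (u+1)) % 8) * 2 ^ (S (u+1))) / 2 ^ (S r) % 8
            = x / 2 ^ (S r) % 8 := by
          rcases lt_or_gt_of_ne (show r ≠ u + 1 from hr) with hlt | hgt
          · have hdiv2 := divHigh x (S (u+1)) (S r) (G (u+1)) hb.1 hb.2
              (S_sep r (u+1) h1 hlt (by omega))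
            rw [hdiv2]
          · exact digLow x (S (u+1)) (S r) _ (S_sep (u+1) r (by omega) hgt h15')
        rw [hdigr, ihdig r h1 h15']
        by_cases hru : r ≤ u
        · rw [if_pos hru, if_pos (by omega)]
        · rw [if_neg hru, if_neg (by omega)]

-- B unfolded to the delta-sum with a per-position digit map
lemma altUnfold (h_ res : Int) :
    h3_rotate_pent60cw_py_alt h_ res =
      (if altLead ((PySem.List.pyRange 1 (res + 1)).map
            (fun r => pyRotDigit (h_ / 2 ^ (S r) % 8))) = 1 then
        h_ + (PySem.List.pyRange 1 (res + 1)).foldl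
          (fun acc r => acc + (rot2 (h_ / 2 ^ (S r) % 8) - h_ / 2 ^ (S r) % 8) * 2 ^ (S r)) 0
      else
        h_ + (PySem.List.pyRange 1 (res + 1)).foldl
          (fun acc r => acc + (pyRotDigit (h_ / 2 ^ (S r) % 8) - h_ / 2 ^ (S r) % 8) * 2 ^ (S r)) 0) := by
  show h_ + ((PySem.List.pyRange 1 (res + 1)).zip ((altDigits h_ res).zip
      (if altLead ((altDigits h_ res).map altRotD) = 1
       then ((altDigits h_ res).map altRotD).map altRotD
       else (altDigits h_ res).map altRotD))).foldl altStep 0 = _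
  rw [altDigits_eq]
  set L := PySem.List.pyRange 1 (res + 1) with hL
  rw [altRot0_eq h_ L]
  have hstep : ∀ (D G : Int → Int),
      (L.zip ((L.map D).zip (L.map G))).foldl altStep 0
        = L.foldl (fun acc r => acc + (G r - D r) * 2 ^ (S r)) 0 := by
    intro D G
    rw [map_zip_triple L _ _ D G rfl rfl, List.foldl_map]
    congr 1
    funext acc r
    show acc + (G r - D r) <<< ((15 - r) * 3).toNat = acc + (G r - D r) * 2 ^ (S r)
    rw [intShl]
    rfl
  by_cases hc : altLead (L.map (fun r => pyRotDigit (h_ / 2 ^ (S r) % 8))) = 1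
  · rw [if_pos hc, if_pos hc, altRot1_eq h_ L, hstep]
  · rw [if_neg hc, if_neg hc, hstep]

-- ===== VERDICT (by name: the statement is the Claim_ definition above) =====
theorem h3_rotate_pent60cw_py_spec : Claim_equal_h3_rotate_pent60cw_py := by
  unfold Claim_equal_h3_rotate_pent60cw_py
  intro h_ res _hdom hpre
  unfold Pre_h3_rotate_pent60cw_py at hpre
  unfold Spec_h3_rotate_pent60cw_py
  rw [altUnfold]
  have hGrot : ∀ r : Int, 1 ≤ r → r ≤ 15 →
      0 ≤ pyRotDigit (h_ / 2 ^ (S r) % 8) ∧ pyRotDigit (h_ / 2 ^ (S r) % 8) < 8 := by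
    intro r _ _
    have hb := digBounds h_ (S r)
    exact ⟨(rotDFacts _ hb.1 hb.2).1, (rotDFacts _ hb.1 hb.2).2.1⟩
  have hGrot2 : ∀ r : Int, 1 ≤ r → r ≤ 15 →
      0 ≤ rot2 (h_ / 2 ^ (S r) % 8) ∧ rot2 (h_ / 2 ^ (S r) % 8) < 8 := by
    intro r h1 h15
    have hb := hGrot r h1 h15
    exact ⟨(rotDFacts _ hb.1 hb.2).1, (rotDFacts _ hb.1 hb.2).2.1⟩
  by_cases hres0 : res ≤ 0
  · have hA0 : h3_rotate_pent60cw_py h_ res = h_ := by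
      unfold h3_rotate_pent60cw_py
      rw [pyRangeNil _ _ (by omega)]
      rfl
    rw [hA0, pyRangeNil _ _ (by omega)]
    simp only [List.map_nil, List.foldl_nil, add_zero]
    rw [show altLead ([] : List Int) = 0 from rfl, if_neg (by norm_num)]
  · push_neg at hres0
    obtain ⟨hBdiv, hBdig⟩ := sumChar h_ (fun r => pyRotDigit (h_ / 2 ^ (S r) % 8)) hGrot
      res.toNat res rfl hpre
    obtain ⟨hB2div, hB2dig⟩ := sumChar h_ (fun r => rot2 (h_ / 2 ^ (S r) % 8)) hGrot2
      res.toNat res rfl hpre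
    rw [show h3_rotate_pent60cw_py h_ res = (foldA h_ res res).2 from rfl]
    rcases invA h_ res hpre res.toNat res rfl (by omega) (le_refl res) with
      ⟨hzero, heq⟩ | ⟨r0, hr01, hr0res, hpre0, hnz, hfd, hdiv, hdigs⟩
    · rw [heq]
      have hlead0 : altLead ((PySem.List.pyRange 1 (res + 1)).map
          (fun r => pyRotDigit (h_ / 2 ^ (S r) % 8))) = 0 := by
        refine altLeadAll0 ((res + 1) - 1).toNat 1 (res+1) _ rfl (fun r hr1 hr2 => ?_)
        rw [hzero r hr1 (by omega)]
        decide
      rw [hlead0, if_neg (by norm_num)]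
      symm
      apply ext15 _ _ hBdiv
      intro r h1 h15'
      rw [hBdig r h1 h15']
      by_cases hrr : r ≤ res
      · rw [if_pos hrr, hzero r h1 hrr]
        decide
      · rw [if_neg hrr]
    · have hb0 : 0 ≤ h_ / 2 ^ (S r0) % 8 := Int.emod_nonneg _ (by norm_num)
      have hb8 : h_ / 2 ^ (S r0) % 8 < 8 := Int.emod_lt_of_pos _ (by norm_num)
      have hrnz : pyRotDigit (h_ / 2 ^ (S r0) % 8) ≠ 0 :=
        fun hcon => hnz ((rotDFacts _ hb0 hb8).2.2.mp hcon)
      have hylead : altLead ((PySem.List.pyRange 1 (res + 1)).map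
          (fun r => pyRotDigit (h_ / 2 ^ (S r) % 8))) = pyRotDigit (h_ / 2 ^ (S r0) % 8) := by
        refine altLeadFirst ((res + 1) - 1).toNat 1 (res+1) r0 _ rfl (by omega) (by omega)
          (fun r hr1 hr2 => ?_) hrnz
        rw [hpre0 r hr1 hr2]
        decide
      rw [hylead]
      by_cases hc : pyRotDigit (h_ / 2 ^ (S r0) % 8) = 1
      · rw [if_pos hc]
        apply ext15
        · rw [hdiv, hB2div]
        · intro r hr1 hr15
          rw [hdigs r hr1 hr15, if_pos hc, hB2dig r hr1 hr15]
          by_cases hrr : r ≤ res <;> simp [hrr]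
      · rw [if_neg hc]
        apply ext15
        · rw [hdiv, hBdiv]
        · intro r hr1 hr15
          rw [hdigs r hr1 hr15, if_neg hc, hBdig r hr1 hr15]
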